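-- pv_equiv track=rewrite | github.com/chasecotton27/Financial-Advisor-Tool | personal_finances_module.py | categorize_income
-- ===== SOURCE A (Python) =====
-- def categorize_income(income):
--
--   salary_income = []
--   wants_reimbursement = []
--   needs_reimbursement = []
--
--   for row in income:
--     if 'APPLE CASH' in row[1] or 'PURCHASE RETURN' in row[1] or 'MOBILE DEPOSIT' in row[1]:
--       wants_reimbursement.append(row)
--     elif 'VENMO CASHOUT' in row[1] or 'ONLINE TRANSFER' in row[1] or 'ZELLE' in row[1]:
--       needs_reimbursement.append(row)
--     elif 'NATIONAL INSTRUM' in row[1] or 'TAX REF' in row[1]: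
--       salary_income.append(row)
--     else:
--       raise Exception('Unrecognized income category.')
--
--   return salary_income, wants_reimbursement, needs_reimbursement
-- ===== SOURCE B (Python) =====
-- def categorize_income(income):
--   # Staged version: label every row once, validate, then build each bucket by filtering.
--   def bucket(row):
--     desc = row[1]
--     if 'APPLE CASH' in desc or 'PURCHASE RETURN' in desc or 'MOBILE DEPOSIT' in desc:
--       return 1
--     if 'VENMO CASHOUT' in desc or 'ONLINE TRANSFER' in desc or 'ZELLE' in desc:
--       return 2
--     if 'NATIONAL INSTRUM' in desc or 'TAX REF' in desc:
--       return 0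
--     return None
--
--   labels = [bucket(row) for row in income]
--   if None in labels:
--     raise Exception('Unrecognized income category.')
--   return ([row for row, l in zip(income, labels) if l == 0],
--           [row for row, l in zip(income, labels) if l == 1],
--           [row for row, l in zip(income, labels) if l == 2])
-- ===== Notes on version B (the rewrite author's own statement) =====
-- stated objective: alternative
-- what changed: Replaces A's single pass with three mutated accumulator lists by a staged label-validate-filter pipeline: compute one label per row, raise if any is unrecognized, then build each returned bucket as a stable filter of the labelled rows.
-- outside the precondition, e.g. on categorize_income([['1', 'RENT']]): A raises Exception, B raises Exception; on categorize_income([['x']]): A raises IndexError, B raises IndexError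
import Mathlib
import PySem

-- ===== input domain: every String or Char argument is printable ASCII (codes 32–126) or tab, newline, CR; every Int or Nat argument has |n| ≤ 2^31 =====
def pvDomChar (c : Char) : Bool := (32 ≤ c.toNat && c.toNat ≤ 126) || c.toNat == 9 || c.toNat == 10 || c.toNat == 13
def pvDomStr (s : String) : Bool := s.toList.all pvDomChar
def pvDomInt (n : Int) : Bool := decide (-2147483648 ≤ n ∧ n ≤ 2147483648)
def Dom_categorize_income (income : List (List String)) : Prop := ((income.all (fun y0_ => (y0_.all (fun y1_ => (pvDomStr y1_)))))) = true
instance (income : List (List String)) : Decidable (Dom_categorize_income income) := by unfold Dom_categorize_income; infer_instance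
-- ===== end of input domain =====

-- B restructures A's single pass with three accumulators into a staged pipeline:
-- label each row once, validate, then build each bucket as a stable filter of the labelled rows.

-- ===== PORT A =====
-- the for-loop over income with the three accumulator lists; on the raise paths
-- (row[1] missing, or no keyword matches — excluded by Pre_) the port returns the accumulators as-is.
def categorize_income_loopA :
    List (List String) → List (List String) → List (List String) → List (List String) →
    List (List String) × List (List String) × List (List String)
  | [], s, w, n => (s, w, n)
  | row :: rest, s, w, n =>
    match PySem.List.pyGet? row 1 with
    | none => (s, w, n)  -- Python: IndexError (outside Pre_)
    | some d =>
      if PySem.Str.isIn "APPLE CASH" d || PySem.Str.isIn "PURCHASE RETURN" d || PySem.Str.isIn "MOBILE DEPOSIT" d then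
        categorize_income_loopA rest s (w ++ [row]) n
      else if PySem.Str.isIn "VENMO CASHOUT" d || PySem.Str.isIn "ONLINE TRANSFER" d || PySem.Str.isIn "ZELLE" d then
        categorize_income_loopA rest s w (n ++ [row])
      else if PySem.Str.isIn "NATIONAL INSTRUM" d || PySem.Str.isIn "TAX REF" d then
        categorize_income_loopA rest (s ++ [row]) w n
      else (s, w, n)  -- Python: raise Exception (outside Pre_)

def categorize_income (income : List (List String)) :
    List (List String) × List (List String) × List (List String) :=
  categorize_income_loopA income [] [] []

-- ===== PORT B =====
-- Source B's bucket(row): label 1 = wants, 2 = needs, 0 = salary, none = unrecognized/IndexError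
def pvBucket (row : List String) : Option Nat :=
  match PySem.List.pyGet? row 1 with
  | none => none  -- Python: IndexError (outside Pre_)
  | some d =>
    if PySem.Str.isIn "APPLE CASH" d || PySem.Str.isIn "PURCHASE RETURN" d || PySem.Str.isIn "MOBILE DEPOSIT" d then
      some 1
    else if PySem.Str.isIn "VENMO CASHOUT" d || PySem.Str.isIn "ONLINE TRANSFER" d || PySem.Str.isIn "ZELLE" d then
      some 2
    else if PySem.Str.isIn "NATIONAL INSTRUM" d || PySem.Str.isIn "TAX REF" d then
      some 0
    else none

def categorize_income_alt (income : List (List String)) :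
    List (List String) × List (List String) × List (List String) :=
  let labels := income.map pvBucket
  -- Python raises here if None ∈ labels (outside Pre_); the port falls through to the filters
  let z := income.zip labels
  ((z.filter (fun p => p.2 == some 0)).map Prod.fst,
   (z.filter (fun p => p.2 == some 1)).map Prod.fst,
   (z.filter (fun p => p.2 == some 2)).map Prod.fst)

-- ===== PRECONDITION & SPEC =====
-- a row's description matches one of A's recognized keyword groups (implies row[1] exists)
def pvRowOk (row : List String) : Bool :=
  match PySem.List.pyGet? row 1 with
  | none => false
  | some d =>
    PySem.Str.isIn "APPLE CASH" d || PySem.Str.isIn "PURCHASE RETURN" d || PySem.Str.isIn "MOBILE DEPOSIT" d ||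
    PySem.Str.isIn "VENMO CASHOUT" d || PySem.Str.isIn "ONLINE TRANSFER" d || PySem.Str.isIn "ZELLE" d ||
    PySem.Str.isIn "NATIONAL INSTRUM" d || PySem.Str.isIn "TAX REF" d

-- Pre_ excludes exactly the inputs where A raises: a row without index 1 (IndexError) or with an
-- unrecognized description (explicit raise).
def Pre_categorize_income (income : List (List String)) : Prop :=
  income.all pvRowOk = true

instance (income : List (List String)) : Decidable (Pre_categorize_income income) := by
  unfold Pre_categorize_income; infer_instance

def pvWitness_categorize_income : List (List String) :=
  [["1", "APPLE CASH payment"], ["2", "ZELLE from Bob"], ["3", "TAX REF 2023"]]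

def Spec_categorize_income (income : List (List String)) (out : List (List String) × List (List String) × List (List String)) : Prop := out = categorize_income_alt income
instance (income : List (List String)) (out : List (List String) × List (List String) × List (List String)) : Decidable (Spec_categorize_income income out) := by unfold Spec_categorize_income; infer_instance

-- ===== CLAIM (what is proved, stated in full; the proofs are below) =====
def Claim_equal_categorize_income : Prop := ∀ (income : List (List String)), Dom_categorize_income income → Pre_categorize_income income → Spec_categorize_income income (categorize_income income)

-- ===== LEMMAS AND PROOFS =====

-- the i-th bucket as B computes it
def pvFilt (i : Nat) (income : List (List String)) : List (List String) :=
  ((income.zip (income.map pvBucket)).filter (fun p => p.2 == some i)).map Prod.fst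

theorem pvFilt_cons (i : Nat) (row : List String) (rest : List (List String)) :
    pvFilt i (row :: rest) =
      (if pvBucket row == some i then [row] else []) ++ pvFilt i rest := by
  unfold pvFilt
  simp only [List.map_cons, List.zip_cons_cons, List.filter_cons]
  split_ifs with h <;> simp_all

theorem loopA_eq_filt (income : List (List String))
    (h : income.all pvRowOk = true) :
    ∀ s w n, categorize_income_loopA income s w n =
      (s ++ pvFilt 0 income, w ++ pvFilt 1 income, n ++ pvFilt 2 income) := by
  induction income with
  | nil => intro s w n; simp [categorize_income_loopA, pvFilt]
  | cons row rest ih =>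
    simp only [List.all_cons, Bool.and_eq_true] at h
    intro s w n
    have hrow := h.1
    unfold pvRowOk at hrow
    cases hd : PySem.List.pyGet? row 1 with
    | none => simp [hd] at hrow
    | some d =>
      rw [hd] at hrow
      have hstep : categorize_income_loopA (row :: rest) s w n =
          (if PySem.Str.isIn "APPLE CASH" d || PySem.Str.isIn "PURCHASE RETURN" d || PySem.Str.isIn "MOBILE DEPOSIT" d then
            categorize_income_loopA rest s (w ++ [row]) n
          else if PySem.Str.isIn "VENMO CASHOUT" d || PySem.Str.isIn "ONLINE TRANSFER" d || PySem.Str.isIn "ZELLE" d then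
            categorize_income_loopA rest s w (n ++ [row])
          else if PySem.Str.isIn "NATIONAL INSTRUM" d || PySem.Str.isIn "TAX REF" d then
            categorize_income_loopA rest (s ++ [row]) w n
          else (s, w, n)) := by
        simp only [categorize_income_loopA, hd]
      rw [hstep]
      have hb : pvBucket row =
          (if PySem.Str.isIn "APPLE CASH" d || PySem.Str.isIn "PURCHASE RETURN" d || PySem.Str.isIn "MOBILE DEPOSIT" d then
            some 1
          else if PySem.Str.isIn "VENMO CASHOUT" d || PySem.Str.isIn "ONLINE TRANSFER" d || PySem.Str.isIn "ZELLE" d then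
            some 2
          else if PySem.Str.isIn "NATIONAL INSTRUM" d || PySem.Str.isIn "TAX REF" d then
            some 0
          else none) := by
        unfold pvBucket; rw [hd]
      by_cases h1 : (PySem.Str.isIn "APPLE CASH" d || PySem.Str.isIn "PURCHASE RETURN" d || PySem.Str.isIn "MOBILE DEPOSIT" d) = true
      · rw [if_pos h1, ih h.2, pvFilt_cons 0, pvFilt_cons 1, pvFilt_cons 2]
        rw [hb, if_pos h1]
        simp
      · rw [if_neg h1]
        by_cases h2 : (PySem.Str.isIn "VENMO CASHOUT" d || PySem.Str.isIn "ONLINE TRANSFER" d || PySem.Str.isIn "ZELLE" d) = true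
        · rw [if_pos h2, ih h.2, pvFilt_cons 0, pvFilt_cons 1, pvFilt_cons 2]
          rw [hb, if_neg h1, if_pos h2]
          simp
        · rw [if_neg h2]
          by_cases h3 : (PySem.Str.isIn "NATIONAL INSTRUM" d || PySem.Str.isIn "TAX REF" d) = true
          · rw [if_pos h3, ih h.2, pvFilt_cons 0, pvFilt_cons 1, pvFilt_cons 2]
            rw [hb, if_neg h1, if_neg h2, if_pos h3]
            simp
          · exfalso
            simp only [Bool.or_eq_true, not_or, Bool.not_eq_true] at h1 h2 h3
            obtain ⟨⟨a1, a2⟩, a3⟩ := h1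
            obtain ⟨⟨b1, b2⟩, b3⟩ := h2
            obtain ⟨c1, c2⟩ := h3
            simp only [a1, a2, a3, b1, b2, b3, c1, c2, Bool.or_self] at hrow
            exact absurd hrow (by decide)

-- ===== VERDICT (by name: the statement is the Claim_ definition above) =====
theorem categorize_income_spec : Claim_equal_categorize_income := by
  intro income _ hpre
  unfold Spec_categorize_income categorize_income categorize_income_alt
  rw [loopA_eq_filt income hpre [] [] []]
  simp [pvFilt]
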